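-- pv_equiv track=rewrite | github.com/marcsingleton/orthology_inference2023 | analysis/ortho_cluster3/cluster4+_graph/cluster4+_graph.py | get_component_type
-- ===== SOURCE A (Python) =====
-- from itertools import combinations
--
-- def get_component_type(OGs, component):
--     node_sets = [{node for edge in OG for node in edge} for OG in OGs]
--     if len(node_sets) == 0:
--         return 0  # Component has no OGs
--     elif len(node_sets) == 1:
--         if len(node_sets[0]) == len(component):
--             return 1  # Component and OG are equal
--         else:
--             return 2  # Component has single OG which is a subset of the component
--     elif any([set.intersection(set1, set2) for set1, set2 in combinations(node_sets, 2)]):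
--         return 4  # Component has multiple non-disjoint OGs
--     else:
--         return 3  # Component has multiple pairwise disjoint OGs
-- ===== SOURCE B (Python) =====
-- def get_component_type(OGs, component):
--     if not OGs:
--         return 0  # Component has no OGs
--     if len(OGs) == 1:
--         nodes = set()
--         for edge in OGs[0]:
--             nodes.update(edge)
--         return 1 if len(nodes) == len(component) else 2
--     # One pass: OGs overlap iff the per-OG node counts sum to more than the union size
--     total = 0
--     union = set()
--     for OG in OGs:
--         nodes = set()
--         for edge in OG:
--             nodes.update(edge)
--         total += len(nodes)
--         union |= nodes
--     return 4 if total > len(union) else 3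
-- ===== Notes on version B (the rewrite author's own statement) =====
-- stated objective: faster
-- what changed: Replaces the quadratic all-pairs set-intersection test with a single pass that sums per-OG node-set sizes and unions them: some pair overlaps iff the total exceeds the union size.
import Mathlib
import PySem

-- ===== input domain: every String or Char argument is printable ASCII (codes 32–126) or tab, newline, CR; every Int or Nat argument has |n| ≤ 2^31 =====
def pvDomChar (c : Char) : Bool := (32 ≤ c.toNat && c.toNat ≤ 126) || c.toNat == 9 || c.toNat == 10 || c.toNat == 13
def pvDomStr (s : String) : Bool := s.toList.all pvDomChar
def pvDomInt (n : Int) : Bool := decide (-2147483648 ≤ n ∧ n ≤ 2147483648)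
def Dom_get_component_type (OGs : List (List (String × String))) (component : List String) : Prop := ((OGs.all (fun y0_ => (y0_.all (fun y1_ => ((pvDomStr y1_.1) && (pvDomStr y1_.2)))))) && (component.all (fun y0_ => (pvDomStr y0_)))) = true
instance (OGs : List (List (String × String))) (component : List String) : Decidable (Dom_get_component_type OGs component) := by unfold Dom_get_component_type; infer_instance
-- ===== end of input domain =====

-- B replaces A's quadratic all-pairs intersection test by one counting pass (overlap iff the
-- per-OG node counts sum to more than the union size); equality of return values is proved below.

-- ===== PORT A =====
-- {node for edge in OG for node in edge}: the set of the nodes in iteration order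
def pvNodeSetA (OG : List (String × String)) : PySem.Set String :=
  PySem.Set.ofList (OG.flatMap (fun e => [e.1, e.2]))

def get_component_type (OGs : List (List (String × String))) (component : List String) : Int :=
  let node_sets := OGs.map pvNodeSetA
  if node_sets.length = 0 then 0
  else if node_sets.length = 1 then
    if (node_sets.headD []).length = component.length then 1 else 2
  else if (PySem.List.combinations node_sets 2).any (fun c =>
      match c with
      | [set1, set2] => !(PySem.Set.inter set1 set2).isEmpty
      | _ => false) then 4
  else 3

-- ===== PORT B =====
-- B's per-OG node set: nodes = set(); for edge in OG: nodes.update(edge)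
def pvNodeSetB (OG : List (String × String)) : PySem.Set String :=
  OG.foldl (fun s e => PySem.Set.update s [e.1, e.2]) PySem.Set.empty

def get_component_type_alt (OGs : List (List (String × String))) (component : List String) : Int :=
  if OGs.length = 0 then 0
  else if OGs.length = 1 then
    let nodes := pvNodeSetB (OGs.headD [])
    if nodes.length = component.length then 1 else 2
  else
    let r := OGs.foldl (fun (p : Int × PySem.Set String) OG =>
      let nodes := pvNodeSetB OG
      (p.1 + PySem.Set.len nodes, PySem.Set.update p.2 nodes)) (0, PySem.Set.empty)
    if r.1 > PySem.Set.len r.2 then 4 else 3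

-- ===== PRECONDITION & SPEC =====
def Spec_get_component_type (OGs : List (List (String × String))) (component : List String) (out : Int) : Prop := out = get_component_type_alt OGs component
instance (OGs : List (List (String × String))) (component : List String) (out : Int) : Decidable (Spec_get_component_type OGs component out) := by unfold Spec_get_component_type; infer_instance

-- ===== CLAIM (what is proved, stated in full; the proofs are below) =====
def Claim_equal_get_component_type : Prop := ∀ (OGs : List (List (String × String))) (component : List String), Dom_get_component_type OGs component → Spec_get_component_type OGs component (get_component_type OGs component)

-- ===== LEMMAS AND PROOFS =====

theorem pv_foldl_update_pairs (OG : List (String × String)) :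
    ∀ (s : PySem.Set String),
      OG.foldl (fun s e => PySem.Set.update s [e.1, e.2]) s
        = PySem.Set.update s (OG.flatMap (fun e => [e.1, e.2])) := by
  induction OG with
  | nil => intro s; simp [PySem.Set.update]
  | cons e r ih =>
    intro s
    simp only [List.foldl_cons, List.flatMap_cons, ih]
    rw [PySem.Set.update_append]

theorem pvNodeSetB_eq : pvNodeSetB = pvNodeSetA := by
  funext OG
  simp only [pvNodeSetB, pvNodeSetA, pv_foldl_update_pairs]
  exact PySem.Set.update_nil_left _

-- pairwise disjointness of the node sets
def pvDisj (s t : List String) : Prop := ∀ y ∈ s, y ∉ t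

-- one update step: |acc ∪ s| ≤ |acc| + |s|
theorem pv_len_update_le (acc : PySem.Set String) (s : List String) :
    (PySem.Set.update acc s).length ≤ acc.length + s.length := by
  rw [PySem.Set.update_eq_append_filter]
  simp only [List.length_append]
  have h1 := List.length_filter_le (fun y => !acc.contains y) (PySem.Set.ofList s)
  have h2 := PySem.Set.length_ofList_le s
  omega

theorem pv_len_update_eq (acc : PySem.Set String) (s : List String) (hs : s.Nodup)
    (hd : ∀ y ∈ s, y ∉ acc) :
    (PySem.Set.update acc s).length = acc.length + s.length := by
  rw [PySem.Set.update_eq_append_filter, PySem.Set.ofList_eq_self_of_nodup s hs]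
  have : List.filter (fun y => !acc.contains y) s = s := by
    apply List.filter_eq_self.2
    intro y hy
    simp
    exact hd y hy
  rw [this, List.length_append]

theorem pv_len_update_lt (acc : PySem.Set String) (s : List String) (hs : s.Nodup)
    (hd : ∃ y ∈ s, y ∈ acc) :
    (PySem.Set.update acc s).length < acc.length + s.length := by
  rw [PySem.Set.update_eq_append_filter, PySem.Set.ofList_eq_self_of_nodup s hs]
  simp only [List.length_append]
  obtain ⟨y, hy, hya⟩ := hd
  have hsub : (List.filter (fun y => !acc.contains y) s).Sublist s := List.filter_sublist
  have : (List.filter (fun y => !acc.contains y) s).length < s.length := by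
    apply lt_of_le_of_ne hsub.length_le
    intro hlen
    have heq : List.filter (fun y => !acc.contains y) s = s := hsub.eq_of_length hlen
    have hyf : y ∈ List.filter (fun y => !acc.contains y) s := by rw [heq]; exact hy
    have hp := List.of_mem_filter hyf
    rw [(PySem.Set.contains_iff acc y).2 hya] at hp
    simp at hp
  omega

-- foldl update: an upper bound …
theorem pv_le (ss : List (List String)) : ∀ (acc : PySem.Set String),
    (List.foldl PySem.Set.update acc ss).length ≤ acc.length + (ss.map List.length).sum := by
  induction ss with
  | nil => intro acc; simp
  | cons s r ih =>
    intro acc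
    simp only [List.foldl_cons, List.map_cons, List.sum_cons]
    have := ih (PySem.Set.update acc s)
    have := pv_len_update_le acc s
    omega

-- … attained exactly on pairwise-disjoint families …
theorem pv_eq (ss : List (List String)) : ∀ (acc : PySem.Set String),
    (∀ s ∈ ss, s.Nodup) → (∀ s ∈ ss, ∀ y ∈ s, y ∉ acc) → ss.Pairwise pvDisj →
    (List.foldl PySem.Set.update acc ss).length = acc.length + (ss.map List.length).sum := by
  induction ss with
  | nil => intro acc _ _ _; simp
  | cons s r ih =>
    intro acc hn hd hp
    simp only [List.foldl_cons, List.map_cons, List.sum_cons]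
    have hrec := ih (PySem.Set.update acc s)
      (fun t ht => hn t (List.mem_cons_of_mem _ ht))
      (by
        intro t ht y hy hmem
        rcases (PySem.Set.mem_update acc s y).1 hmem with h | h
        · exact hd t (List.mem_cons_of_mem _ ht) y hy h
        · exact (List.pairwise_cons.1 hp).1 t ht y h hy)
      (List.pairwise_cons.1 hp).2
    have hstep := pv_len_update_eq acc s (hn s (List.mem_cons_self)) (hd s (List.mem_cons_self))
    omega

-- … and strictly below it whenever some overlap exists
theorem pv_lt (ss : List (List String)) : ∀ (acc : PySem.Set String),
    (∀ s ∈ ss, s.Nodup) →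
    ((∃ s ∈ ss, ∃ y ∈ s, y ∈ acc) ∨ ¬ ss.Pairwise pvDisj) →
    (List.foldl PySem.Set.update acc ss).length < acc.length + (ss.map List.length).sum := by
  induction ss with
  | nil =>
    intro acc _ h
    rcases h with ⟨s, hs, _⟩ | h
    · exact absurd hs (List.not_mem_nil)
    · exact absurd List.Pairwise.nil h
  | cons s r ih =>
    intro acc hn h
    simp only [List.foldl_cons, List.map_cons, List.sum_cons]
    by_cases hc : ∃ y ∈ s, y ∈ acc
    · have hstep := pv_len_update_lt acc s (hn s (List.mem_cons_self)) hc
      have hrest := pv_le r (PySem.Set.update acc s)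
      omega
    · -- s is disjoint from acc, so the step adds exactly |s|; the violation moves into r
      have hstep := pv_len_update_eq acc s (hn s (List.mem_cons_self))
        (by intro y hy hya; exact hc ⟨y, hy, hya⟩)
      have hrec : (List.foldl PySem.Set.update (PySem.Set.update acc s) r).length
          < (PySem.Set.update acc s).length + (r.map List.length).sum := by
        apply ih (PySem.Set.update acc s) (fun t ht => hn t (List.mem_cons_of_mem _ ht))
        rcases h with ⟨t, ht, y, hy, hya⟩ | hp
        · rcases List.mem_cons.1 ht with rfl | ht'
          · exact absurd ⟨y, hy, hya⟩ hc
          · exact Or.inl ⟨t, ht', y, hy, (PySem.Set.mem_update acc s y).2 (Or.inl hya)⟩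
        · by_cases hpr : r.Pairwise pvDisj
          · -- then the head must overlap some tail set
            have : ∃ t ∈ r, ∃ y ∈ s, y ∈ t := by
              by_contra hno
              push Not at hno
              exact hp (List.pairwise_cons.2 ⟨fun t ht y hy hyt => hno t ht y hy hyt, hpr⟩)
            obtain ⟨t, ht, y, hy, hyt⟩ := this
            exact Or.inl ⟨t, ht, y, hyt, (PySem.Set.mem_update acc s y).2 (Or.inr hy)⟩
          · exact Or.inr hpr
      omega

-- the counting characterisation B relies on
theorem pv_key (ss : List (List String)) (hn : ∀ s ∈ ss, s.Nodup) :
    ((List.foldl PySem.Set.update PySem.Set.empty ss).length < (ss.map List.length).sum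
      ↔ ¬ ss.Pairwise pvDisj) := by
  constructor
  · intro hlt hp
    have := pv_eq ss PySem.Set.empty hn (by intro s _ y _ h; exact absurd h (List.not_mem_nil)) hp
    simp only [PySem.Set.empty, List.length_nil, Nat.zero_add] at this hlt
    omega
  · intro hp
    have := pv_lt ss PySem.Set.empty hn (Or.inr hp)
    simpa [PySem.Set.empty] using this

-- A's any-over-combinations test detects exactly a pairwise-disjointness failure
theorem pv_any_iff (ss : List (PySem.Set String)) :
    ((PySem.List.combinations ss 2).any (fun c =>
      match c with
      | [set1, set2] => !(PySem.Set.inter set1 set2).isEmpty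
      | _ => false)) = true ↔ ¬ ss.Pairwise pvDisj := by
  rw [List.any_eq_true]
  constructor
  · rintro ⟨c, hc, hf⟩ hp
    obtain ⟨hsub, hlen⟩ := (PySem.List.mem_combinations_iff ss 2 c).1 hc
    match c, hlen with
    | [s, t], _ =>
      have hdisj : pvDisj s t := List.pairwise_iff_forall_sublist.1 hp hsub
      simp only [Bool.not_eq_eq_eq_not] at hf
      have : PySem.Set.inter s t ≠ [] := by
        intro h; rw [h] at hf; simp at hf
      obtain ⟨y, hy⟩ := List.exists_mem_of_ne_nil _ this
      obtain ⟨hys, hyt⟩ := (PySem.Set.mem_inter s t y).1 hy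
      exact hdisj y hys hyt
  · intro hp
    have : ∃ s t, [s, t].Sublist ss ∧ ¬ pvDisj s t := by
      by_contra hno
      push Not at hno
      exact hp (List.pairwise_iff_forall_sublist.2 (fun {a b} h => hno a b h))
    obtain ⟨s, t, hsub, hnd⟩ := this
    refine ⟨[s, t], (PySem.List.mem_combinations_iff ss 2 _).2 ⟨hsub, rfl⟩, ?_⟩
    simp only [pvDisj] at hnd
    push Not at hnd
    obtain ⟨y, hys, hyt⟩ := hnd
    have hmem : y ∈ PySem.Set.inter s t := (PySem.Set.mem_inter s t y).2 ⟨hys, hyt⟩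
    have hne := List.ne_nil_of_mem hmem
    simp [hne]

-- B's pair-fold computes (total count, union)
theorem pv_fold (OGs : List (List (String × String))) : ∀ (t0 : Int) (u0 : PySem.Set String),
    OGs.foldl (fun (p : Int × PySem.Set String) OG =>
      (p.1 + PySem.Set.len (pvNodeSetB OG), PySem.Set.update p.2 (pvNodeSetB OG))) (t0, u0)
    = (t0 + (((OGs.map pvNodeSetB).map List.length).sum : Int),
       List.foldl PySem.Set.update u0 (OGs.map pvNodeSetB)) := by
  induction OGs with
  | nil => intro t0 u0; simp
  | cons a r ih =>
    intro t0 u0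
    simp only [List.foldl_cons, List.map_cons, List.sum_cons, ih]
    rw [Prod.ext_iff]
    refine ⟨?_, rfl⟩
    simp only [PySem.Set.len]
    push_cast
    ring

-- ===== VERDICT (by name: the statement is the Claim_ definition above) =====
theorem get_component_type_spec : Claim_equal_get_component_type := by
  intro OGs component _
  unfold Spec_get_component_type
  match OGs with
  | [] => rfl
  | [OG] =>
    simp [get_component_type, get_component_type_alt, pvNodeSetB_eq]
  | a :: b :: r =>
    have hn : ∀ s ∈ (a :: b :: r).map pvNodeSetA, s.Nodup := by
      intro s hs
      obtain ⟨OG, _, rfl⟩ := List.mem_map.1 hs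
      exact PySem.Set.nodup_ofList _
    have hkey := pv_key ((a :: b :: r).map pvNodeSetA) hn
    have hany := pv_any_iff ((a :: b :: r).map pvNodeSetA)
    have hint : ((0 : Int) + ((((a :: b :: r).map pvNodeSetA).map List.length).sum : Int) >
        PySem.Set.len (List.foldl PySem.Set.update PySem.Set.empty ((a :: b :: r).map pvNodeSetA)))
        ↔ (List.foldl PySem.Set.update PySem.Set.empty ((a :: b :: r).map pvNodeSetA)).length
            < (((a :: b :: r).map pvNodeSetA).map List.length).sum := by
      simp only [PySem.Set.len, gt_iff_lt]
      omega
    simp only [get_component_type, get_component_type_alt]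
    rw [pv_fold, pvNodeSetB_eq]
    simp only [List.length_map, List.length_cons]
    rw [if_neg (by omega : ¬(r.length + 1 + 1 = 0)), if_neg (by omega : ¬(r.length + 1 + 1 = 0)),
       if_neg (by omega : ¬(r.length + 1 + 1 = 1)), if_neg (by omega : ¬(r.length + 1 + 1 = 1))]
    exact if_congr (hany.trans (hkey.symm.trans hint.symm)) rfl rfl
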